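-- pv_equiv track=rewrite | github.com/hs7982/codingtest | 프로그래머스/1/82612. 부족한 금액 계산하기/부족한 금액 계산하기.py | solution
-- ===== SOURCE A (Python) =====
-- def solution(price, money, count):
--     price_calc = 0
--     for i in range(count+1):
--         price_calc += price * i
--     if price_calc - money < 0:
--         return 0
--     else:
--         return price_calc - money
-- ===== SOURCE B (Python) =====
-- def solution(price, money, count):
--     total = price * count * (count + 1) // 2 if count > 0 else 0
--     return max(0, total - money)
-- ===== Notes on version B (the rewrite author's own statement) =====
-- stated objective: faster
-- what changed: Replaces the O(count) accumulation loop with the closed-form arithmetic-series formula price*count*(count+1)//2 and max for the floor at 0.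
import Mathlib
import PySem

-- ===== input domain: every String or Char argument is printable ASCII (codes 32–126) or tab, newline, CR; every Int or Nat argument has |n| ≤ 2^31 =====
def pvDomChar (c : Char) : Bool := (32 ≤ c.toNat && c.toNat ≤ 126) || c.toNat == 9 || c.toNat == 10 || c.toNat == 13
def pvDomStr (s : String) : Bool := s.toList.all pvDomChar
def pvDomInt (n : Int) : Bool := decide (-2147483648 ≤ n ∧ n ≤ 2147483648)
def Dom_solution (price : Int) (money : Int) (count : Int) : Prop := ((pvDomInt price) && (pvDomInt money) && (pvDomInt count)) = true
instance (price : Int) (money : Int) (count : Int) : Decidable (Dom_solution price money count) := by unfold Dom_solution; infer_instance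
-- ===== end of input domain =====

-- B replaces A's O(count) accumulation loop by the closed-form arithmetic series price*count*(count+1)//2 (objective: faster).


-- ===== PORT A =====
def solution (price : Int) (money : Int) (count : Int) : Int :=
  let price_calc := (PySem.List.pyRange 0 (count + 1) 1).foldl (fun acc i => acc + price * i) 0
  if price_calc - money < 0 then 0 else price_calc - money

-- ===== PORT B =====
def solution_alt (price : Int) (money : Int) (count : Int) : Int :=
  let total := if count > 0 then PySem.Int.floordiv (price * count * (count + 1)) 2 else 0
  max 0 (total - money)

-- ===== PRECONDITION & SPEC =====
def Spec_solution (price : Int) (money : Int) (count : Int) (out : Int) : Prop := out = solution_alt price money count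
instance (price : Int) (money : Int) (count : Int) (out : Int) : Decidable (Spec_solution price money count out) := by unfold Spec_solution; infer_instance

-- ===== CLAIM (what is proved, stated in full; the proofs are below) =====
def Claim_equal_solution : Prop := ∀ (price : Int) (money : Int) (count : Int), Dom_solution price money count → Spec_solution price money count (solution price money count)

-- ===== LEMMAS AND PROOFS =====

-- Twice A's loop accumulation over range(n) equals price*n*(n-1).
theorem pv_two_mul_loop (price : Int) (n : Nat) :
    2 * ((PySem.List.pyRange 0 (n : Int) 1).foldl (fun acc i => acc + price * i) 0) = price * n * (n - 1) := by
  induction n with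
  | zero => simp [PySem.List.pyRange_one_eq_nil]
  | succ m ih =>
    rw [show ((m + 1 : Nat) : Int) = (m : Int) + 1 by push_cast; ring,
        PySem.List.pyRange_one_succ_right (by positivity), List.foldl_append]
    simp only [List.foldl_cons, List.foldl_nil]
    rw [mul_add, ih]
    ring

-- A's accumulated sum equals B's closed form.
theorem pv_loop_eq_closed (price count : Int) :
    (PySem.List.pyRange 0 (count + 1) 1).foldl (fun acc i => acc + price * i) 0 =
    (if count > 0 then PySem.Int.floordiv (price * count * (count + 1)) 2 else 0) := by
  by_cases h : 0 ≤ count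
  · have hn : ((count + 1).toNat : Int) = count + 1 := Int.toNat_of_nonneg (by omega)
    have h2 := pv_two_mul_loop price (count + 1).toNat
    rw [hn] at h2
    have hS : price * count * (count + 1) =
        2 * ((PySem.List.pyRange 0 (count + 1) 1).foldl (fun acc i => acc + price * i) 0) := by
      rw [h2]; ring
    split_ifs with hpos
    · rw [PySem.Int.floordiv_eq_ediv_of_pos (by norm_num), hS,
        Int.mul_ediv_cancel_left _ (by norm_num)]
    · have hc0 : count = 0 := by omega
      subst hc0
      omega
  · rw [PySem.List.pyRange_one_eq_nil (by omega), if_neg (by omega)]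
    rfl

-- ===== VERDICT (by name: the statement is the Claim_ definition above) =====
theorem solution_spec : Claim_equal_solution := by
  intro price money count _
  unfold Spec_solution solution solution_alt
  rw [pv_loop_eq_closed]
  dsimp only
  split_ifs with h <;> omega
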